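-- pv_equiv track=rewrite | github.com/hyejin97/POS_tagger | main.py | tag_unknowns
-- ===== SOURCE A (Python) =====
-- import string
--
-- suffix_noun = ["ment", "ness", "age", "ship", "ance", "cy", "ty", "dom", "ee", "ence", "er", "hood", "ion", "action", "ism", "ist", "ity", "ling", "or", "ry", "scape"]
--
-- suffix_adj = ["ive", "ful", "ous", "able", "ible", "ly", "ese", "ian", "ic", "ish", "less"]
--
-- suffix_verb = ["ize", "ify", "ise", "ate"]
--
-- suffix_adv = ["wise", "ward", "wards"]
--
-- punctuations = set(string.punctuation)
--
-- def tag_unknowns(word):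
--     '''
--     For computing probability of UNKNOWN_WORD
--     '''
--     if any(word.endswith(suffix) for suffix in suffix_noun):
--         return "UNKNOWN_noun"
--     elif any(word.endswith(suffix) for suffix in suffix_adj):
--         return "UNKNOWN_adj"
--     elif any(word.endswith(suffix) for suffix in suffix_verb):
--         return "UNKNOWN_verb"
--     elif any(word.endswith(suffix) for suffix in suffix_adv):
--         return "UNKNOWN_adv"
--     elif any(char in punctuations for char in word):
--         return "UNKNOWN_punct"
--     elif any(char.isdigit() for char in word):
--         return "UNKNOWN_digit"
--     elif any(char.isupper() for char in word):
--         return "UNKNOWN_capital"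
--     else:
--         return "UNKNOWN"
-- ===== SOURCE B (Python) =====
-- import string
--
-- suffix_noun = ["ment", "ness", "age", "ship", "ance", "cy", "ty", "dom", "ee", "ence", "er", "hood", "ion", "action", "ism", "ist", "ity", "ling", "or", "ry", "scape"]
-- suffix_adj = ["ive", "ful", "ous", "able", "ible", "ly", "ese", "ian", "ic", "ish", "less"]
-- suffix_verb = ["ize", "ify", "ise", "ate"]
-- suffix_adv = ["wise", "ward", "wards"]
-- punctuations = set(string.punctuation)
--
-- # One dict indexing every suffix by its string (keys are 2..6 chars long, all distinct).
-- # Shortest-match-first over the word's tails coincides with A's group order because the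
-- # only cross-group pair of nested suffixes is ("ise" verb) inside ("wise" adv), where the
-- # shorter one wins in both schemes.
-- _SUFFIX_TAG = {}
-- for _sfxs, _tag in ((suffix_noun, "UNKNOWN_noun"), (suffix_adj, "UNKNOWN_adj"),
--                     (suffix_verb, "UNKNOWN_verb"), (suffix_adv, "UNKNOWN_adv")):
--     for _s in _sfxs:
--         _SUFFIX_TAG[_s] = _tag
--
-- _RANK_TAG = ["UNKNOWN", "UNKNOWN_capital", "UNKNOWN_digit", "UNKNOWN_punct"]
--
-- def _rank(c):
--     if c in punctuations:
--         return 3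
--     if c.isdigit():
--         return 2
--     if c.isupper():
--         return 1
--     return 0
--
-- def tag_unknowns(word):
--     for k in range(2, 7):
--         tag = _SUFFIX_TAG.get(word[-k:])
--         if tag is not None:
--             return tag
--     return _RANK_TAG[max(map(_rank, word), default=0)]
-- ===== Notes on version B (the rewrite author's own statement) =====
-- stated objective: alternative
-- what changed: The four group scans of 39 endswith calls are replaced by one suffix->tag dict probed with the word's five tails word[-2:]..word[-6:] shortest first (valid because the only cross-group nested suffix pair is 'ise' inside 'wise', where the shorter suffix has the higher-priority group), and the three short-circuit character scans are replaced by a max over a per-character rank (punct=3, digit=2, upper=1) indexed into a tag table.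
import Mathlib
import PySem

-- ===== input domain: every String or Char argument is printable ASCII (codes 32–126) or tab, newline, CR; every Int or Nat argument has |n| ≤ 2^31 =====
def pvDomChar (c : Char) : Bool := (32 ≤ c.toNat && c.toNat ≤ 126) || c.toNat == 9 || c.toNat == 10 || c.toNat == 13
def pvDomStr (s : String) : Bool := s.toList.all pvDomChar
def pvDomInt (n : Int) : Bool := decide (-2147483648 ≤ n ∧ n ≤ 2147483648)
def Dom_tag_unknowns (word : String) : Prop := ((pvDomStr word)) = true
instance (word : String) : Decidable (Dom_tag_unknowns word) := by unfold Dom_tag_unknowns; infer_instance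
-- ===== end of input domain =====

-- B replaces A's four any/endswith group scans by ONE dict indexing every suffix, probed with the
-- word's tails word[-2:]..word[-6:] shortest first, and replaces the three short-circuit character
-- scans by a max over a per-character rank indexed into a tag table (objective: alternative).

-- ===== PORT A =====
def suffix_noun : List String := ["ment", "ness", "age", "ship", "ance", "cy", "ty", "dom", "ee", "ence", "er", "hood", "ion", "action", "ism", "ist", "ity", "ling", "or", "ry", "scape"]
def suffix_adj : List String := ["ive", "ful", "ous", "able", "ible", "ly", "ese", "ian", "ic", "ish", "less"]
def suffix_verb : List String := ["ize", "ify", "ise", "ate"]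
def suffix_adv : List String := ["wise", "ward", "wards"]
-- set(string.punctuation): the 32 ASCII punctuation characters (all distinct)
def punctuations : List Char := ['!', '"', '#', '$', '%', '&', '\'', '(', ')', '*', '+', ',', '-', '.', '/', ':', ';', '<', '=', '>', '?', '@', '[', '\\', ']', '^', '_', '`', '{', '|', '}', '~']

def tag_unknowns (word : String) : String :=
  if suffix_noun.any (fun s => PySem.Str.endswith word s) then "UNKNOWN_noun"
  else if suffix_adj.any (fun s => PySem.Str.endswith word s) then "UNKNOWN_adj"
  else if suffix_verb.any (fun s => PySem.Str.endswith word s) then "UNKNOWN_verb"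
  else if suffix_adv.any (fun s => PySem.Str.endswith word s) then "UNKNOWN_adv"
  else if word.toList.any (fun c => punctuations.contains c) then "UNKNOWN_punct"
  else if word.toList.any (fun c => PySem.Chars.isdigit c) then "UNKNOWN_digit"
  else if word.toList.any (fun c => PySem.Chars.isupper c) then "UNKNOWN_capital"
  else "UNKNOWN"

-- ===== PORT B =====
-- _SUFFIX_TAG: one dict mapping each suffix (all distinct, 2..6 chars) to its tag
def suffixTagPairs : List (String × String) :=
  [("ment", "UNKNOWN_noun"), ("ness", "UNKNOWN_noun"), ("age", "UNKNOWN_noun"), ("ship", "UNKNOWN_noun"),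
   ("ance", "UNKNOWN_noun"), ("cy", "UNKNOWN_noun"), ("ty", "UNKNOWN_noun"), ("dom", "UNKNOWN_noun"),
   ("ee", "UNKNOWN_noun"), ("ence", "UNKNOWN_noun"), ("er", "UNKNOWN_noun"), ("hood", "UNKNOWN_noun"),
   ("ion", "UNKNOWN_noun"), ("action", "UNKNOWN_noun"), ("ism", "UNKNOWN_noun"), ("ist", "UNKNOWN_noun"),
   ("ity", "UNKNOWN_noun"), ("ling", "UNKNOWN_noun"), ("or", "UNKNOWN_noun"), ("ry", "UNKNOWN_noun"),
   ("scape", "UNKNOWN_noun"),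
   ("ive", "UNKNOWN_adj"), ("ful", "UNKNOWN_adj"), ("ous", "UNKNOWN_adj"), ("able", "UNKNOWN_adj"),
   ("ible", "UNKNOWN_adj"), ("ly", "UNKNOWN_adj"), ("ese", "UNKNOWN_adj"), ("ian", "UNKNOWN_adj"),
   ("ic", "UNKNOWN_adj"), ("ish", "UNKNOWN_adj"), ("less", "UNKNOWN_adj"),
   ("ize", "UNKNOWN_verb"), ("ify", "UNKNOWN_verb"), ("ise", "UNKNOWN_verb"), ("ate", "UNKNOWN_verb"),
   ("wise", "UNKNOWN_adv"), ("ward", "UNKNOWN_adv"), ("wards", "UNKNOWN_adv")]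

def suffixTagDict : PySem.Dict String String := PySem.Dict.ofList suffixTagPairs

def rankTags : List String := ["UNKNOWN", "UNKNOWN_capital", "UNKNOWN_digit", "UNKNOWN_punct"]

-- _rank(c)
def rank (c : Char) : Int :=
  if punctuations.contains c then 3
  else if PySem.Chars.isdigit c then 2
  else if PySem.Chars.isupper c then 1
  else 0

-- the for-loop over range(2, 7) with early return: word[-k:] is Str.slice word (some (-k)) none
def suffixLoop (word : String) : List Int → Option String
  | [] => none
  | k :: ks =>
      match suffixTagDict.get? (PySem.Str.slice word (some (-k)) none) with
      | some t => some t
      | none => suffixLoop word ks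

def tag_unknowns_alt (word : String) : String :=
  match suffixLoop word (PySem.List.pyRange 2 7 1) with
  | some t => t
  | none =>
      -- _RANK_TAG[max(map(_rank, word), default=0)]; the index is provably 0..3, so the
      -- pyGet? is always some and the .getD "" default is unreachable
      (PySem.List.pyGet? rankTags (PySem.List.maxD (word.toList.map rank) (fun r => r) 0)).getD ""

-- ===== PRECONDITION & SPEC =====
def Spec_tag_unknowns (word : String) (out : String) : Prop := out = tag_unknowns_alt word
instance (word : String) (out : String) : Decidable (Spec_tag_unknowns word out) := by unfold Spec_tag_unknowns; infer_instance

-- ===== CLAIM (what is proved, stated in full; the proofs are below) =====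
def Claim_equal_tag_unknowns : Prop := ∀ (word : String), Dom_tag_unknowns word → Spec_tag_unknowns word (tag_unknowns word)

-- ===== LEMMAS AND PROOFS =====

-- group priority of a tag (proof-side helper)
def prio (t : String) : Nat :=
  if t = "UNKNOWN_noun" then 0 else if t = "UNKNOWN_adj" then 1 else if t = "UNKNOWN_verb" then 2 else 3

-- the dict really contains exactly the pairs
set_option maxRecDepth 10000 in
theorem dict_items : suffixTagDict.items = suffixTagPairs := by decide

set_option maxRecDepth 10000 in
theorem pairs_get : ∀ p ∈ suffixTagPairs, suffixTagDict.get? p.1 = some p.2 := by decide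

set_option maxRecDepth 10000 in
theorem pairs_len : ∀ p ∈ suffixTagPairs, 2 ≤ p.1.toList.length ∧ p.1.toList.length ≤ 6 := by decide

-- KEY fact behind shortest-first: a suffix nested inside another never has larger group priority
set_option maxRecDepth 10000 in
theorem pairs_prio : ∀ p ∈ suffixTagPairs, ∀ q ∈ suffixTagPairs,
    p.1.toList <:+ q.1.toList → prio p.2 ≤ prio q.2 := by decide

set_option maxRecDepth 10000 in
theorem noun_pairs : ∀ s ∈ suffix_noun, (s, "UNKNOWN_noun") ∈ suffixTagPairs := by decide
set_option maxRecDepth 10000 in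
theorem adj_pairs : ∀ s ∈ suffix_adj, (s, "UNKNOWN_adj") ∈ suffixTagPairs := by decide
set_option maxRecDepth 10000 in
theorem verb_pairs : ∀ s ∈ suffix_verb, (s, "UNKNOWN_verb") ∈ suffixTagPairs := by decide
set_option maxRecDepth 10000 in
theorem adv_pairs : ∀ s ∈ suffix_adv, (s, "UNKNOWN_adv") ∈ suffixTagPairs := by decide

set_option maxRecDepth 10000 in
theorem pairs_cases : ∀ p ∈ suffixTagPairs,
    (p.2 = "UNKNOWN_noun" ∧ p.1 ∈ suffix_noun) ∨ (p.2 = "UNKNOWN_adj" ∧ p.1 ∈ suffix_adj) ∨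
    (p.2 = "UNKNOWN_verb" ∧ p.1 ∈ suffix_verb) ∨ (p.2 = "UNKNOWN_adv" ∧ p.1 ∈ suffix_adv) := by decide

-- word[-k:] for positive k is the last min(k, len) characters
theorem tail_toList (word : String) (k : Nat) (hk : 0 < k) :
    (PySem.Str.slice word (some (-(k : Int))) none).toList
      = word.toList.drop (word.toList.length - k) := by
  rw [PySem.Str.toList_slice, PySem.Chars.slice_eq_listSlice,
    PySem.List.slice_from_neg_natCast _ k hk]

theorem tail_suffix (word : String) (k : Nat) (hk : 0 < k) :
    (PySem.Str.slice word (some (-(k : Int))) none).toList <:+ word.toList := by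
  rw [tail_toList word k hk]; exact List.drop_suffix _ _

theorem tail_len_le (word : String) (k : Nat) (hk : 0 < k) :
    (PySem.Str.slice word (some (-(k : Int))) none).toList.length ≤ k := by
  rw [tail_toList word k hk, List.length_drop]; omega

theorem tail_eq_of_suffix (word s : String) (hpos : 0 < s.toList.length)
    (hs : s.toList <:+ word.toList) :
    PySem.Str.slice word (some (-(s.toList.length : Int))) none = s := by
  apply String.toList_inj.mp
  obtain ⟨u, hu⟩ := hs
  rw [tail_toList word s.toList.length hpos, ← hu, List.length_append]
  have h : u.length + s.toList.length - s.toList.length = u.length := by omega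
  rw [h, List.drop_left]

-- a matching suffix is hit exactly at k = its length
theorem match_hit (word : String) (p : String × String) (hp : p ∈ suffixTagPairs)
    (hs : p.1.toList <:+ word.toList) :
    suffixTagDict.get? (PySem.Str.slice word (some (-(p.1.toList.length : Int))) none) = some p.2 := by
  have hlen := pairs_len p hp
  rw [tail_eq_of_suffix word p.1 (by omega) hs]; exact pairs_get p hp

set_option maxRecDepth 40000 in
theorem suffixLoop_cons (word : String) (j : Int) (js : List Int) :
    suffixLoop word (j :: js) =
      (match suffixTagDict.get? (PySem.Str.slice word (some (-j)) none) with
       | some t => some t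
       | none => suffixLoop word js) := rfl

theorem suffixLoop_nil (word : String) : suffixLoop word [] = none := rfl

theorem loop_ne_none (word : String) (ks : List Int) (k : Int) (t : String)
    (hk : k ∈ ks) (h : suffixTagDict.get? (PySem.Str.slice word (some (-k)) none) = some t) :
    suffixLoop word ks ≠ none := by
  induction ks with
  | nil => simp at hk
  | cons j js ih =>
      rcases List.mem_cons.mp hk with rfl | hk'
      · rw [suffixLoop_cons, h]; simp
      · cases hj : suffixTagDict.get? (PySem.Str.slice word (some (-j)) none) with
        | some t' => rw [suffixLoop_cons, hj]; simp
        | none => rw [suffixLoop_cons, hj]; exact ih hk'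

theorem loop_none_spec (word : String) (h : suffixLoop word [2, 3, 4, 5, 6] = none) :
    ∀ p ∈ suffixTagPairs, ¬ p.1.toList <:+ word.toList := by
  intro p hp hs
  obtain ⟨h2, h6⟩ := pairs_len p hp
  have hhit := match_hit word p hp hs
  have hmem : ((p.1.toList.length : Nat) : Int) ∈ ([2, 3, 4, 5, 6] : List Int) := by
    interval_cases h : p.1.toList.length <;> simp
  exact loop_ne_none word _ _ _ hmem hhit h

theorem hit_spec (word : String) (k : Nat) (t : String) (hk0 : 0 < k)
    (hnone : ∀ j : Nat, 2 ≤ j → j < k →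
      suffixTagDict.get? (PySem.Str.slice word (some (-(j : Int))) none) = none)
    (hhit : suffixTagDict.get? (PySem.Str.slice word (some (-(k : Int))) none) = some t) :
    ∃ s : String, (s, t) ∈ suffixTagPairs ∧ s.toList <:+ word.toList ∧
      ∀ p ∈ suffixTagPairs, p.1.toList <:+ word.toList → s.toList.length ≤ p.1.toList.length := by
  have hmem : (PySem.Str.slice word (some (-(k : Int))) none, t) ∈ suffixTagPairs := by
    have := PySem.Dict.mem_items_of_get?_eq_some suffixTagDict hhit
    rwa [dict_items] at this
  refine ⟨_, hmem, tail_suffix word k hk0, ?_⟩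
  intro p hp hps
  have hsl := tail_len_le word k hk0
  by_contra hlt
  rw [not_le] at hlt
  have hlen := pairs_len p hp
  have hphit := match_hit word p hp hps
  rw [hnone p.1.toList.length (by omega) (by omega)] at hphit
  simp at hphit

theorem loop_some_spec (word : String) (t : String)
    (h : suffixLoop word [2, 3, 4, 5, 6] = some t) :
    ∃ s : String, (s, t) ∈ suffixTagPairs ∧ s.toList <:+ word.toList ∧
      ∀ p ∈ suffixTagPairs, p.1.toList <:+ word.toList → s.toList.length ≤ p.1.toList.length := by
  rw [suffixLoop_cons] at h
  cases h2 : suffixTagDict.get? (PySem.Str.slice word (some (-(2 : Int))) none) with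
  | some t2 =>
      rw [h2] at h
      obtain rfl : t2 = t := by simpa using h
      exact hit_spec word 2 t2 (by omega)
        (fun j hj2 hjk => absurd hjk (by omega)) (by exact_mod_cast h2)
  | none =>
      rw [h2] at h; rw [suffixLoop_cons] at h
      cases h3 : suffixTagDict.get? (PySem.Str.slice word (some (-(3 : Int))) none) with
      | some t3 =>
          rw [h3] at h; obtain rfl : t3 = t := by simpa using h
          refine hit_spec word 3 t3 (by omega) ?_ (by exact_mod_cast h3)
          intro j hj2 hjk; interval_cases j
          · exact_mod_cast h2
      | none =>
          rw [h3] at h; rw [suffixLoop_cons] at h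
          cases h4 : suffixTagDict.get? (PySem.Str.slice word (some (-(4 : Int))) none) with
          | some t4 =>
              rw [h4] at h; obtain rfl : t4 = t := by simpa using h
              refine hit_spec word 4 t4 (by omega) ?_ (by exact_mod_cast h4)
              intro j hj2 hjk; interval_cases j
              · exact_mod_cast h2
              · exact_mod_cast h3
          | none =>
              rw [h4] at h; rw [suffixLoop_cons] at h
              cases h5 : suffixTagDict.get? (PySem.Str.slice word (some (-(5 : Int))) none) with
              | some t5 =>
                  rw [h5] at h; obtain rfl : t5 = t := by simpa using h
                  refine hit_spec word 5 t5 (by omega) ?_ (by exact_mod_cast h5)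
                  intro j hj2 hjk; interval_cases j
                  · exact_mod_cast h2
                  · exact_mod_cast h3
                  · exact_mod_cast h4
              | none =>
                  rw [h5] at h; rw [suffixLoop_cons] at h
                  cases h6 : suffixTagDict.get? (PySem.Str.slice word (some (-(6 : Int))) none) with
                  | some t6 =>
                      rw [h6] at h; obtain rfl : t6 = t := by simpa using h
                      refine hit_spec word 6 t6 (by omega) ?_ (by exact_mod_cast h6)
                      intro j hj2 hjk; interval_cases j
                      · exact_mod_cast h2
                      · exact_mod_cast h3
                      · exact_mod_cast h4
                      · exact_mod_cast h5
                  | none =>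
                      rw [h6] at h
                      simp [suffixLoop_nil] at h

-- ===== character-class half =====

def tRank (w : List Char) : Int :=
  if w.any (fun c => punctuations.contains c) then 3
  else if w.any (fun c => PySem.Chars.isdigit c) then 2
  else if w.any (fun c => PySem.Chars.isupper c) then 1
  else 0

theorem rank_nonneg (c : Char) : 0 ≤ rank c := by
  unfold rank; split_ifs <;> omega

theorem tRank_cons (c : Char) (w : List Char) : tRank (c :: w) = max (rank c) (tRank w) := by
  unfold tRank rank
  by_cases hp : punctuations.contains c <;>
    by_cases hd : PySem.Chars.isdigit c <;>
      by_cases hu : PySem.Chars.isupper c <;>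
        simp [List.any_cons, hd, hu] <;> split_ifs <;> simp_all

theorem fold_max_rank (w : List Char) (m : Int) (hm : 0 ≤ m) :
    (w.map rank).foldl max m = max m (tRank w) := by
  induction w generalizing m with
  | nil => simp [tRank]; omega
  | cons c w ih =>
      simp only [List.map_cons, List.foldl_cons]
      rw [ih (max m (rank c)) (le_max_of_le_left hm), tRank_cons, max_assoc]

theorem maxD_rank (w : List Char) :
    PySem.List.maxD (w.map rank) (fun r => r) 0 = tRank w := by
  cases w with
  | nil => simp [PySem.List.maxD, PySem.List.max?, tRank]
  | cons c w =>
      unfold PySem.List.maxD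
      rw [List.map_cons, PySem.List.max?_id_cons, Option.getD_some,
        fold_max_rank w (rank c) (rank_nonneg c), tRank_cons]

theorem char_part (w : List Char) :
    (PySem.List.pyGet? rankTags (PySem.List.maxD (w.map rank) (fun r => r) 0)).getD "" =
      if w.any (fun c => punctuations.contains c) then "UNKNOWN_punct"
      else if w.any (fun c => PySem.Chars.isdigit c) then "UNKNOWN_digit"
      else if w.any (fun c => PySem.Chars.isupper c) then "UNKNOWN_capital"
      else "UNKNOWN" := by
  rw [maxD_rank]
  unfold tRank
  split_ifs <;> rfl

-- endswith on the String side ↔ list suffix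
theorem endswith_iff_suffix (word s : String) :
    PySem.Str.endswith word s = true ↔ s.toList <:+ word.toList := by
  rw [PySem.Str.endswith_eq, PySem.Chars.endswith_iff]

-- ===== VERDICT (by name: the statement is the Claim_ definition above) =====
theorem tag_unknowns_spec : Claim_equal_tag_unknowns := by
  intro word _
  unfold Spec_tag_unknowns tag_unknowns tag_unknowns_alt
  have hR : PySem.List.pyRange 2 7 1 = [2, 3, 4, 5, 6] := by decide
  rw [hR]
  cases hl : suffixLoop word [2, 3, 4, 5, 6] with
  | none =>
      have hno := loop_none_spec word hl
      have h1 : suffix_noun.any (fun s => PySem.Str.endswith word s) = false := by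
        rw [List.any_eq_false]; intro s hs
        rw [Bool.not_eq_true, ← Bool.not_eq_true, endswith_iff_suffix]
        exact hno (s, "UNKNOWN_noun") (noun_pairs s hs)
      have h2 : suffix_adj.any (fun s => PySem.Str.endswith word s) = false := by
        rw [List.any_eq_false]; intro s hs
        rw [Bool.not_eq_true, ← Bool.not_eq_true, endswith_iff_suffix]
        exact hno (s, "UNKNOWN_adj") (adj_pairs s hs)
      have h3 : suffix_verb.any (fun s => PySem.Str.endswith word s) = false := by
        rw [List.any_eq_false]; intro s hs
        rw [Bool.not_eq_true, ← Bool.not_eq_true, endswith_iff_suffix]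
        exact hno (s, "UNKNOWN_verb") (verb_pairs s hs)
      have h4 : suffix_adv.any (fun s => PySem.Str.endswith word s) = false := by
        rw [List.any_eq_false]; intro s hs
        rw [Bool.not_eq_true, ← Bool.not_eq_true, endswith_iff_suffix]
        exact hno (s, "UNKNOWN_adv") (adv_pairs s hs)
      simp only [h1, h2, h3, h4, Bool.false_eq_true, if_false]
      rw [char_part word.toList]
  | some t =>
      obtain ⟨s, hmem, hsfx, hmin⟩ := loop_some_spec word t hl
      have hall : ∀ p ∈ suffixTagPairs, p.1.toList <:+ word.toList → prio t ≤ prio p.2 := by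
        intro p hp hpw
        exact pairs_prio (s, t) hmem p hp
          (List.suffix_of_suffix_length_le hsfx hpw (hmin p hp hpw))
      have hewS : PySem.Str.endswith word s = true := (endswith_iff_suffix word s).mpr hsfx
      have hcase := pairs_cases (s, t) hmem
      simp only at hcase
      by_cases hn : suffix_noun.any (fun s => PySem.Str.endswith word s) = true
      · rw [if_pos hn]
        obtain ⟨s', hs', hew⟩ := List.any_eq_true.mp hn
        have hle := hall (s', "UNKNOWN_noun") (noun_pairs s' hs')
          ((endswith_iff_suffix word s').mp hew)
        rcases hcase with ⟨ht, _⟩ | ⟨ht, _⟩ | ⟨ht, _⟩ | ⟨ht, _⟩ <;>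
          first
            | exact ht.symm
            | (exfalso; simp [prio, ht] at hle)
      · rw [if_neg hn]
        by_cases ha : suffix_adj.any (fun s => PySem.Str.endswith word s) = true
        · rw [if_pos ha]
          obtain ⟨s', hs', hew⟩ := List.any_eq_true.mp ha
          have hle := hall (s', "UNKNOWN_adj") (adj_pairs s' hs')
            ((endswith_iff_suffix word s').mp hew)
          rcases hcase with ⟨ht, hg⟩ | ⟨ht, _⟩ | ⟨ht, _⟩ | ⟨ht, _⟩
          · exact absurd (List.any_eq_true.mpr ⟨s, hg, hewS⟩) hn
          · exact ht.symm
          · exfalso; simp [prio, ht] at hle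
          · exfalso; simp [prio, ht] at hle
        · rw [if_neg ha]
          by_cases hv : suffix_verb.any (fun s => PySem.Str.endswith word s) = true
          · rw [if_pos hv]
            obtain ⟨s', hs', hew⟩ := List.any_eq_true.mp hv
            have hle := hall (s', "UNKNOWN_verb") (verb_pairs s' hs')
              ((endswith_iff_suffix word s').mp hew)
            rcases hcase with ⟨ht, hg⟩ | ⟨ht, hg⟩ | ⟨ht, _⟩ | ⟨ht, _⟩
            · exact absurd (List.any_eq_true.mpr ⟨s, hg, hewS⟩) hn
            · exact absurd (List.any_eq_true.mpr ⟨s, hg, hewS⟩) ha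
            · exact ht.symm
            · exfalso; simp [prio, ht] at hle
          · rw [if_neg hv]
            rcases hcase with ⟨ht, hg⟩ | ⟨ht, hg⟩ | ⟨ht, hg⟩ | ⟨ht, hg⟩
            · exact absurd (List.any_eq_true.mpr ⟨s, hg, hewS⟩) hn
            · exact absurd (List.any_eq_true.mpr ⟨s, hg, hewS⟩) ha
            · exact absurd (List.any_eq_true.mpr ⟨s, hg, hewS⟩) hv
            · rw [if_pos (List.any_eq_true.mpr ⟨s, hg, hewS⟩)]
              exact ht.symm
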